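-- pv_equiv track=rewrite | github.com/2reten/K_VAN_Korea | auto_shift_scheduler.py | get_majority_shift
-- ===== SOURCE A (Python) =====
-- def find_fixed_index(pattern, fixed_role_name):
--     for i, duty in enumerate(pattern):
--         if duty == fixed_role_name:
--             return i
--     return None
--
-- def get_majority_shift(today_pattern, reference_pattern, fixed_roles):
--     shifts = []
--     for role in fixed_roles:
--         ref_idx = find_fixed_index(reference_pattern, role)
--         today_idx = find_fixed_index(today_pattern, role)
--         if ref_idx is not None and today_idx is not None:
--             shift = (ref_idx - today_idx) % len(today_pattern)
--             shifts.append(shift)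
--     if not shifts:
--         return 0
--     return max(set(shifts), key=shifts.count)
-- ===== SOURCE B (Python) =====
-- def get_majority_shift(today_pattern, reference_pattern, fixed_roles):
--     ref_pos = {}
--     for i, duty in enumerate(reference_pattern):
--         ref_pos.setdefault(duty, i)
--     today_pos = {}
--     for i, duty in enumerate(today_pattern):
--         today_pos.setdefault(duty, i)
--     n = len(today_pattern)
--     shifts = sorted(
--         (ref_pos[r] - today_pos[r]) % n
--         for r in fixed_roles
--         if r in ref_pos and r in today_pos
--     )
--     if not shifts:
--         return 0
--     best_val, best_cnt = shifts[0], 0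
--     rest = shifts
--     while rest:
--         x = rest[0]
--         k = 0
--         while k < len(rest) and rest[k] == x:
--             k += 1
--         if k >= best_cnt:
--             best_val, best_cnt = x, k
--         rest = rest[k:]
--     return best_val
-- ===== Notes on version B (the rewrite author's own statement) =====
-- stated objective: faster
-- what changed: B finds the mode by sorting the shifts and scanning maximal runs of equal values in one pass (largest value wins ties of run length), instead of A's per-role rescans of both patterns plus max over set(shifts) keyed by the quadratic shifts.count; indices come from first-occurrence dicts built once.
-- outside the precondition, e.g. on get_majority_shift(['a', 'b', 'c'], ['a', 'c', 'b'], ['a', 'b', 'c']): A returns 0, B returns 2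
import Mathlib
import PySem

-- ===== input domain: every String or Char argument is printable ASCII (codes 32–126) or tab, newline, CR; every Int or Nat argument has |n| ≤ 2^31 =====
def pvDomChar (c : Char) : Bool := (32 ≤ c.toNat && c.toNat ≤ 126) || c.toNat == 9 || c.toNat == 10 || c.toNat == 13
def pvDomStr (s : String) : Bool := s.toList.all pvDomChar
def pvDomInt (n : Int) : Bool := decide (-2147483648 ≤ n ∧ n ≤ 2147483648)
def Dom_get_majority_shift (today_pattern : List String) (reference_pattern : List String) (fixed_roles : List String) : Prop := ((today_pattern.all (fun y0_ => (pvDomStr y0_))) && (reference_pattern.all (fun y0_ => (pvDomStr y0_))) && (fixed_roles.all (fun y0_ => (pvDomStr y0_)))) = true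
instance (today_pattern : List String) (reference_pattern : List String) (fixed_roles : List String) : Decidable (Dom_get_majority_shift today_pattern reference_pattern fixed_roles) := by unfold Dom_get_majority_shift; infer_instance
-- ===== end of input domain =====

-- B: sorts the per-role shifts once and finds the mode by a single run-scan over the
-- sorted list, instead of A's per-role rescans plus quadratic set/count mode extraction.


-- ===== PORT A =====
def findFixedIndexAux (fixed_role_name : String) : List (Int × String) → Option Int
  | [] => none
  | (i, duty) :: rest =>
      if duty == fixed_role_name then some i else findFixedIndexAux fixed_role_name rest

def find_fixed_index (pattern : List String) (fixed_role_name : String) : Option Int :=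
  findFixedIndexAux fixed_role_name (PySem.List.enumerate pattern)

def get_majority_shift (today_pattern : List String) (reference_pattern : List String) (fixed_roles : List String) : Int :=
  let shifts : List Int := fixed_roles.foldl (fun shifts role =>
    match find_fixed_index reference_pattern role, find_fixed_index today_pattern role with
    | some ref_idx, some today_idx =>
        shifts ++ [PySem.Int.mod (ref_idx - today_idx) (today_pattern.length : Int)]
    | _, _ => shifts) []
  if shifts = [] then 0
  else
    -- max(set(shifts), key=shifts.count); some-match is total since shifts ≠ []
    match PySem.List.max? (PySem.Set.ofList shifts) (fun x => (shifts.count x : Int)) with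
    | some m => m
    | none => 0

-- ===== PORT B =====
-- first-occurrence position dict: for i, duty in enumerate(p): d.setdefault(duty, i)
def firstPos (pattern : List String) : PySem.Dict String Int :=
  (PySem.List.enumerate pattern).foldl
    (fun d p => if d.contains p.2 then d else d.insert p.2 p.1) PySem.Dict.empty

-- the outer while loop over the sorted list: the inner while counts the leading run
-- (k = takeWhile length) and rest[k:] is exactly dropWhile of the same predicate
def bestRun : List Int → Int → Nat → Int
  | [], best_val, _ => best_val
  | x :: xs, best_val, best_cnt =>
      let k := (List.takeWhile (fun y => y == x) (x :: xs)).length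
      let rest := List.dropWhile (fun y => y == x) (x :: xs)
      if best_cnt ≤ k then bestRun rest x k else bestRun rest best_val best_cnt
  termination_by l _ _ => l.length
  decreasing_by
    all_goals
      simp only [List.dropWhile_cons, beq_self_eq_true, if_true, List.length_cons]
      exact Nat.lt_succ_of_le (List.length_dropWhile_le _ _)

def get_majority_shift_alt (today_pattern : List String) (reference_pattern : List String) (fixed_roles : List String) : Int :=
  let ref_pos := firstPos reference_pattern
  let today_pos := firstPos today_pattern
  let n : Int := today_pattern.length
  let shifts : List Int := PySem.List.sorted
    (fixed_roles.filterMap (fun r =>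
      if ref_pos.contains r && today_pos.contains r then
        -- ref_pos[r]/today_pos[r]: lookups guarded by the 'in' tests, so getD is exact
        some (PySem.Int.mod (ref_pos.getD r 0 - today_pos.getD r 0) n)
      else none))
    (fun x => x) false
  match shifts with
  | [] => 0
  | x :: xs => bestRun (x :: xs) x 0

-- ===== PRECONDITION & SPEC =====
-- spec-level per-role shift (first-occurrence indices), independent of both ports
def specShift? (today_pattern : List String) (reference_pattern : List String) (role : String) : Option Int :=
  (List.idxOf? role reference_pattern).bind (fun ri =>
    (List.idxOf? role today_pattern).map (fun ti =>
      PySem.Int.mod ((ri : Int) - (ti : Int)) (today_pattern.length : Int)))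

def specShifts (today_pattern : List String) (reference_pattern : List String) (fixed_roles : List String) : List Int :=
  fixed_roles.filterMap (specShift? today_pattern reference_pattern)

-- multiplicity of each distinct shift value, and the largest such multiplicity
def modeCounts (S : List Int) : List Nat :=
  (PySem.List.dedup S).map (fun v => S.count v)

-- Pre_ excludes inputs where two distinct shift values tie for the highest multiplicity:
-- there A's result comes from CPython's hash-dependent set iteration order, which no port models.
def Pre_get_majority_shift (today_pattern : List String) (reference_pattern : List String) (fixed_roles : List String) : Prop :=
  (modeCounts (specShifts today_pattern reference_pattern fixed_roles)).count
      ((modeCounts (specShifts today_pattern reference_pattern fixed_roles)).foldl max 0) ≤ 1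

instance (today_pattern : List String) (reference_pattern : List String) (fixed_roles : List String) : Decidable (Pre_get_majority_shift today_pattern reference_pattern fixed_roles) := by unfold Pre_get_majority_shift; infer_instance

def pvWitness_get_majority_shift : List String × List String × List String :=
  (["a", "b"], ["b", "a"], ["a", "b"])

def Spec_get_majority_shift (today_pattern : List String) (reference_pattern : List String) (fixed_roles : List String) (out : Int) : Prop := out = get_majority_shift_alt today_pattern reference_pattern fixed_roles
instance (today_pattern : List String) (reference_pattern : List String) (fixed_roles : List String) (out : Int) : Decidable (Spec_get_majority_shift today_pattern reference_pattern fixed_roles out) := by unfold Spec_get_majority_shift; infer_instance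

-- ===== CLAIM (what is proved, stated in full; the proofs are below) =====
def Claim_equal_get_majority_shift : Prop := ∀ (today_pattern : List String) (reference_pattern : List String) (fixed_roles : List String), Dom_get_majority_shift today_pattern reference_pattern fixed_roles → Pre_get_majority_shift today_pattern reference_pattern fixed_roles → Spec_get_majority_shift today_pattern reference_pattern fixed_roles (get_majority_shift today_pattern reference_pattern fixed_roles)

-- ===== LEMMAS AND PROOFS =====

-- A's scanning helper is the first-occurrence index
theorem findFixedIndexAux_enumerate (r : String) (xs : List String) (s : Int) :
    findFixedIndexAux r (PySem.List.enumerate xs s) =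
      (List.idxOf? r xs).map (fun n => s + (n : Int)) := by
  induction xs generalizing s with
  | nil => simp [findFixedIndexAux, PySem.List.enumerate_nil]
  | cons x xs ih =>
      rw [PySem.List.enumerate_cons]
      by_cases h : x == r
      · simp [findFixedIndexAux, h, List.idxOf?_cons]
      · simp only [findFixedIndexAux, h, if_neg, Bool.false_eq_true, not_false_eq_true,
          List.idxOf?_cons, ih]
        cases List.idxOf? r xs <;> simp [h] <;> omega

theorem find_fixed_index_eq (p : List String) (r : String) :
    find_fixed_index p r = (List.idxOf? r p).map (fun n => (n : Int)) := by
  rw [find_fixed_index, findFixedIndexAux_enumerate]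
  simp

-- A's shifts accumulator = specShifts
theorem stepA (tp rp : List String) (init : List Int) (r : String) :
    (match find_fixed_index rp r, find_fixed_index tp r with
      | some ref_idx, some today_idx =>
          init ++ [PySem.Int.mod (ref_idx - today_idx) (tp.length : Int)]
      | _, _ => init) = init ++ (specShift? tp rp r).toList := by
  rw [find_fixed_index_eq, find_fixed_index_eq, specShift?]
  cases List.idxOf? r rp <;> cases List.idxOf? r tp <;> simp

theorem shifts_eq_aux (tp rp : List String) (fr : List String) : ∀ (init : List Int),
    fr.foldl (fun shifts role =>
      match find_fixed_index rp role, find_fixed_index tp role with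
      | some ref_idx, some today_idx =>
          shifts ++ [PySem.Int.mod (ref_idx - today_idx) (tp.length : Int)]
      | _, _ => shifts) init = init ++ specShifts tp rp fr := by
  induction fr with
  | nil => intro init; simp [specShifts]
  | cons r fr ih =>
      intro init
      rw [List.foldl_cons]
      show (fr.foldl _ (match find_fixed_index rp r, find_fixed_index tp r with
        | some ref_idx, some today_idx =>
            init ++ [PySem.Int.mod (ref_idx - today_idx) (tp.length : Int)]
        | _, _ => init)) = _
      rw [stepA, ih]
      cases h : specShift? tp rp r <;>
        simp [specShifts, List.filterMap_cons, h]

theorem shifts_eq (tp rp fr : List String) :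
    fr.foldl (fun shifts role =>
      match find_fixed_index rp role, find_fixed_index tp role with
      | some ref_idx, some today_idx =>
          shifts ++ [PySem.Int.mod (ref_idx - today_idx) (tp.length : Int)]
      | _, _ => shifts) [] = specShifts tp rp fr := by
  simpa using shifts_eq_aux tp rp fr []

-- B's first-occurrence dict lookup
theorem firstPos_get?_aux (r : String) (xs : List String) : ∀ (s : Int) (d : PySem.Dict String Int),
    ((PySem.List.enumerate xs s).foldl
        (fun d p => if d.contains p.2 then d else d.insert p.2 p.1) d).get? r
      = if d.contains r then d.get? r
        else (List.idxOf? r xs).map (fun n => s + (n : Int)) := by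
  induction xs with
  | nil =>
      intro s d
      simp only [PySem.List.enumerate_nil, List.foldl_nil, List.idxOf?_nil, Option.map_none]
      by_cases hc : d.contains r
      · simp [hc]
      · simp [hc, (PySem.Dict.get?_eq_none_iff_contains d r).2 (by simpa using hc)]
  | cons x xs ih =>
      intro s d
      rw [PySem.List.enumerate_cons, List.foldl_cons]
      by_cases hrx : r = x
      · subst hrx
        by_cases hc : d.contains r
        · rw [if_pos hc, ih]
          simp [hc]
        · rw [if_neg (by simp [hc]), ih]
          rw [if_pos (by simp [PySem.Dict.contains_insert])]
          rw [PySem.Dict.get?_insert_self]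
          simp [hc, List.idxOf?_cons]
      · have hbx : (x == r) = false := beq_eq_false_iff_ne.mpr (Ne.symm hrx)
        have hrb : (r == x) = false := beq_eq_false_iff_ne.mpr hrx
        by_cases hc : d.contains x
        · rw [if_pos hc, ih]
          by_cases hr : d.contains r
          · simp [hr]
          · simp only [hr, Bool.false_eq_true, if_false, List.idxOf?_cons, hbx,
              if_neg, not_false_eq_true]
            cases List.idxOf? r xs <;> simp <;> push_cast <;> ring
        · rw [if_neg (by simp [hc]), ih]
          rw [PySem.Dict.contains_insert, PySem.Dict.get?_insert_of_ne _ _ hrx, hrb]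
          by_cases hr : d.contains r
          · simp [hr]
          · simp only [hr, Bool.false_eq_true, if_false, Bool.false_or, List.idxOf?_cons, hbx,
              if_neg, not_false_eq_true]
            cases List.idxOf? r xs <;> simp <;> push_cast <;> ring

theorem firstPos_get? (p : List String) (r : String) :
    (firstPos p).get? r = (List.idxOf? r p).map (fun n => (n : Int)) := by
  rw [firstPos, firstPos_get?_aux]
  simp

theorem firstPos_contains (p : List String) (r : String) :
    (firstPos p).contains r = (List.idxOf? r p).isSome := by
  rw [PySem.Dict.contains_eq_isSome_get?, firstPos_get?]
  cases List.idxOf? r p <;> simp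

-- B's guarded comprehension produces exactly specShifts
theorem shiftsB_eq (tp rp fr : List String) :
    fr.filterMap (fun r =>
      if (firstPos rp).contains r && (firstPos tp).contains r then
        some (PySem.Int.mod ((firstPos rp).getD r 0 - (firstPos tp).getD r 0) (tp.length : Int))
      else none) = specShifts tp rp fr := by
  rw [specShifts]
  congr 1
  funext r
  rw [firstPos_contains, firstPos_contains, specShift?,
    PySem.Dict.getD_eq_get?_getD, PySem.Dict.getD_eq_get?_getD, firstPos_get?, firstPos_get?]
  cases List.idxOf? r rp <;> cases List.idxOf? r tp <;> simp

-- run decomposition facts in a sorted (Pairwise ≤) list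
theorem run_facts (x : Int) (xs : List Int) (hl : (x :: xs).Pairwise (· ≤ ·)) :
    x ∉ List.dropWhile (fun y => y == x) (x :: xs)
    ∧ (x :: xs).count x = (List.takeWhile (fun y => y == x) (x :: xs)).length
    ∧ (∀ z ∈ List.dropWhile (fun y => y == x) (x :: xs),
        (x :: xs).count z = (List.dropWhile (fun y => y == x) (x :: xs)).count z)
    ∧ (∀ z ∈ (x :: xs), z = x ∨ z ∈ List.dropWhile (fun y => y == x) (x :: xs))
    ∧ (List.dropWhile (fun y => y == x) (x :: xs)).Pairwise (· ≤ ·) := by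
  set l := x :: xs with hldef
  set t := List.takeWhile (fun y => y == x) l with htdef
  set r := List.dropWhile (fun y => y == x) l with hrdef
  have htr : t ++ r = l := List.takeWhile_append_dropWhile
  have ht_all : ∀ z ∈ t, z = x := by
    intro z hz
    have := List.mem_takeWhile_imp hz
    simpa [htdef] using (by simpa using this : (z == x) = true)
  have hr_pair : r.Pairwise (· ≤ ·) := hl.sublist (hrdef ▸ List.dropWhile_sublist _)
  have hx_notin : x ∉ r := by
    intro hxr
    cases hr : r with
    | nil => rw [hr] at hxr; simp at hxr
    | cons h rt =>
        have hhne : (h == x) = false := by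
          have := List.head?_dropWhile_not (fun y => y == x) l
          rw [← hrdef, hr] at this
          simpa using this
        have hle : ∀ z ∈ rt, h ≤ z := by
          have := hr ▸ hr_pair
          exact fun z hz => (List.pairwise_cons.1 this).1 z hz
        have hxl : x ≤ h := by
          have hhl : h ∈ l := htr ▸ (List.mem_append.2 (Or.inr (hr ▸ List.mem_cons_self)))
          rw [hldef] at hhl
          rcases List.mem_cons.1 hhl with h1 | h1
          · exact le_of_eq h1.symm
          · exact (List.pairwise_cons.1 hl).1 h h1
        have hxh : x < h := lt_of_le_of_ne hxl (by intro e; rw [e] at hhne; simp at hhne)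
        rw [hr] at hxr
        rcases List.mem_cons.1 hxr with h1 | h1
        · omega
        · have := hle x h1; omega
  have hcx : l.count x = t.length := by
    have : l.count x = t.count x + r.count x := by rw [← htr, List.count_append]
    rw [this, List.count_eq_zero.2 hx_notin,
      List.count_eq_length.2 (fun b hb => ((ht_all b hb) ▸ rfl : x = b))]
    omega
  have hcz : ∀ z ∈ r, l.count z = r.count z := by
    intro z hz
    have hzx : z ≠ x := fun e => hx_notin (e ▸ hz)
    have : l.count z = t.count z + r.count z := by rw [← htr, List.count_append]
    rw [this, List.count_eq_zero.2 (fun hzt => hzx (ht_all z hzt))]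
    omega
  have hmem : ∀ z ∈ l, z = x ∨ z ∈ r := by
    intro z hz
    rcases List.mem_append.1 (htr ▸ hz) with h | h
    · exact Or.inl (ht_all z h)
    · exact Or.inr h
  exact ⟨hx_notin, hcx, hcz, hmem, hr_pair⟩

-- the run scan returns a value of maximal multiplicity (or keeps a best that beats every run)
theorem bestRun_spec (N : Nat) : ∀ (l : List Int), l.length ≤ N → l.Pairwise (· ≤ ·) →
    ∀ (bv : Int) (bc : Nat),
    (bestRun l bv bc = bv ∧ ∀ z ∈ l, l.count z < bc)
    ∨ (∃ z ∈ l, bestRun l bv bc = z ∧ bc ≤ l.count z ∧ ∀ w ∈ l, l.count w ≤ l.count z) := by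
  induction N with
  | zero =>
      intro l hlen _ bv bc
      have : l = [] := List.eq_nil_of_length_eq_zero (Nat.le_zero.1 hlen)
      subst this
      left; exact ⟨by rw [bestRun], by simp⟩
  | succ N ih =>
      intro l hlen hl bv bc
      cases l with
      | nil => left; exact ⟨by rw [bestRun], by simp⟩
      | cons x xs =>
          obtain ⟨hnx, hcx, hcz, hmem, hrp⟩ := run_facts x xs hl
          set t := List.takeWhile (fun y => y == x) (x :: xs) with htdef
          set r := List.dropWhile (fun y => y == x) (x :: xs) with hrdef
          have hrlen : r.length ≤ N := by
            have : r.length < (x :: xs).length := by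
              rw [hrdef, List.dropWhile_cons]
              simp only [beq_self_eq_true, if_pos, List.length_cons]
              exact Nat.lt_succ_of_le (List.length_dropWhile_le _ _)
            omega
          have hstep : bestRun (x :: xs) bv bc =
              if bc ≤ t.length then bestRun r x t.length else bestRun r bv bc := by
            rw [bestRun]
          have hxcnt : 1 ≤ (x :: xs).count x := List.one_le_count_iff.2 List.mem_cons_self
          by_cases hb : bc ≤ t.length
          · rw [hstep, if_pos hb]
            rcases ih r hrlen hrp x t.length with ⟨he, hall⟩ | ⟨z, hz, he, hzc, hall⟩
            · -- kept x: every value in r has count < t.length = count x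
              right
              refine ⟨x, List.mem_cons_self, he, by rw [hcx]; exact hb, ?_⟩
              · intro w hw
                rcases hmem w hw with h1 | h1
                · subst h1; exact le_refl _
                · rw [hcz w h1, hcx]
                  exact le_of_lt (hall w h1)
            · -- switched to a value z of r
              right
              have hzl : z ∈ (x :: xs) := (List.dropWhile_sublist _).mem hz
              refine ⟨z, hzl, he, ?_, ?_⟩
              · rw [hcz z hz]; omega
              · intro w hw
                rcases hmem w hw with h1 | h1
                · subst h1
                  rw [hcx, hcz z hz]; exact hzc
                · rw [hcz w h1, hcz z hz]; exact hall w h1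
          · rw [hstep, if_neg hb]
            push_neg at hb
            rcases ih r hrlen hrp bv bc with ⟨he, hall⟩ | ⟨z, hz, he, hzc, hall⟩
            · left
              refine ⟨he, ?_⟩
              intro z hzl
              rcases hmem z hzl with h1 | h1
              · subst h1; rw [hcx]; omega
              · rw [hcz z h1]; exact hall z h1
            · right
              have hzl : z ∈ (x :: xs) := (List.dropWhile_sublist _).mem hz
              refine ⟨z, hzl, he, by rw [hcz z hz]; exact hzc, ?_⟩
              intro w hw
              rcases hmem w hw with h1 | h1
              · subst h1
                rw [hcx, hcz z hz]
                omega
              · rw [hcz w h1, hcz z hz]; exact hall w h1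

-- a predicate holding at two distinct members of a list is counted at least twice
theorem two_le_countP {α : Type} (l : List α) (p : α → Bool) (x y : α) (hx : x ∈ l)
    (hy : y ∈ l) (hxy : x ≠ y) (hpx : p x = true) (hpy : p y = true) : 2 ≤ l.countP p := by
  obtain ⟨l1, l2, rfl⟩ := List.append_of_mem hx
  have hy' : y ∈ l1 ∨ y ∈ l2 := by
    rcases List.mem_append.1 hy with h | h
    · exact Or.inl h
    · rcases List.mem_cons.1 h with h | h
      · exact absurd h.symm hxy
      · exact Or.inr h
  rcases hy' with h | h
  · have h1 : 0 < l1.countP p := List.countP_pos_iff.2 ⟨y, h, hpy⟩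
    simp [List.countP_append, List.countP_cons, hpx]
    omega
  · have h2 : 0 < l2.countP p := List.countP_pos_iff.2 ⟨y, h, hpy⟩
    simp [List.countP_append, List.countP_cons, hpx]
    omega

theorem foldl_max_le {l : List Nat} {b init : Nat} (h : ∀ c ∈ l, c ≤ b) (h0 : init ≤ b) :
    l.foldl max init ≤ b := by
  induction l generalizing init with
  | nil => exact h0
  | cons c t ih =>
      exact ih (fun z hz => h z (List.mem_cons_of_mem _ hz))
        (max_le h0 (h c (List.mem_cons_self)))

-- Pre_ says the most common shift value is unique
theorem pre_unique (tp rp fr : List String) (hpre : Pre_get_majority_shift tp rp fr) :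
    ∀ x ∈ specShifts tp rp fr, ∀ y ∈ specShifts tp rp fr,
      (∀ z ∈ specShifts tp rp fr,
        (specShifts tp rp fr).count z ≤ (specShifts tp rp fr).count x) →
      (∀ z ∈ specShifts tp rp fr,
        (specShifts tp rp fr).count z ≤ (specShifts tp rp fr).count y) →
      x = y := by
  intro x hx y hy hmx hmy
  by_contra hxy
  set S := specShifts tp rp fr with hSdef
  have hxD : x ∈ PySem.List.dedup S := (PySem.List.mem_dedup S x).2 hx
  have hyD : y ∈ PySem.List.dedup S := (PySem.List.mem_dedup S y).2 hy
  have hCle : ∀ c ∈ modeCounts S, c ≤ S.count x := by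
    intro c hc
    obtain ⟨v, hv, rfl⟩ := List.mem_map.1 hc
    exact hmx v ((PySem.List.mem_dedup S v).1 hv)
  have hCle' : ∀ c ∈ modeCounts S, c ≤ S.count y := by
    intro c hc
    obtain ⟨v, hv, rfl⟩ := List.mem_map.1 hc
    exact hmy v ((PySem.List.mem_dedup S v).1 hv)
  have hxC : S.count x ∈ modeCounts S := List.mem_map.2 ⟨x, hxD, rfl⟩
  have hyC : S.count y ∈ modeCounts S := List.mem_map.2 ⟨y, hyD, rfl⟩
  have hMx : (modeCounts S).foldl max 0 = S.count x :=
    le_antisymm (foldl_max_le hCle (Nat.zero_le _))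
      ((PySem.List.le_foldl_max (modeCounts S) 0).2 _ hxC)
  have hMy : (modeCounts S).foldl max 0 = S.count y :=
    le_antisymm (foldl_max_le hCle' (Nat.zero_le _))
      ((PySem.List.le_foldl_max (modeCounts S) 0).2 _ hyC)
  have h2 : 2 ≤ (modeCounts S).count ((modeCounts S).foldl max 0) := by
    rw [List.count_eq_countP, modeCounts, List.countP_map]
    refine two_le_countP _ _ x y hxD hyD hxy ?_ ?_
    · simpa [Function.comp, modeCounts] using hMx.symm
    · simpa [Function.comp, modeCounts] using hMy.symm
  unfold Pre_get_majority_shift at hpre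
  rw [← hSdef] at hpre
  omega

-- the distinct-element list of a nonempty list is nonempty
theorem ofList_ne_nil {S : List Int} (hS : S ≠ []) : PySem.Set.ofList S ≠ [] := by
  cases S with
  | nil => exact absurd rfl hS
  | cons a t =>
      intro h0
      have ha := (PySem.Set.mem_ofList (a :: t) a).2 (by simp)
      rw [h0] at ha
      simp at ha

-- ===== VERDICT (by name: the statement is the Claim_ definition above) =====
theorem get_majority_shift_spec : Claim_equal_get_majority_shift := by
  intro tp rp fr _ hpre
  unfold Spec_get_majority_shift
  simp only [get_majority_shift, get_majority_shift_alt]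
  rw [shifts_eq, shiftsB_eq]
  by_cases hS : specShifts tp rp fr = []
  · rw [hS]
    rfl
  · set S := specShifts tp rp fr with hSdef
    have hOf : PySem.Set.ofList S ≠ [] := ofList_ne_nil hS
    -- A's branch: mA is a value of maximal multiplicity in S
    obtain ⟨mA, hmA⟩ : ∃ m, PySem.List.max? (PySem.Set.ofList S)
        (fun x => (S.count x : Int)) = some m := by
      cases h : PySem.List.max? (PySem.Set.ofList S) (fun x => (S.count x : Int)) with
      | none => exact absurd ((PySem.List.max?_eq_none_iff _ _).1 h) hOf
      | some m => exact ⟨m, rfl⟩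
    have hmAS : mA ∈ S := (PySem.Set.mem_ofList S mA).1 (PySem.List.max?_mem hmA)
    have hmodeA : ∀ z ∈ S, S.count z ≤ S.count mA := by
      intro z hz
      have := PySem.List.max?_isMax hmA z ((PySem.Set.mem_ofList S z).2 hz)
      exact_mod_cast this
    -- B's branch: the run scan over sorted S yields a value of maximal multiplicity
    set L := PySem.List.sorted S (fun x => x) false with hLdef
    have hperm : L.Perm S := PySem.List.sorted_perm S _ _
    have hLne : L ≠ [] := fun h0 => hS (by
      have := hperm; rw [h0] at this; exact this.symm.eq_nil)
    have hLp : L.Pairwise (· ≤ ·) := PySem.List.sorted_pairwise S (fun x => x)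
    obtain ⟨x, xs, hL⟩ : ∃ x xs, L = x :: xs := by
      cases hc : L with
      | nil => exact absurd hc hLne
      | cons a t => exact ⟨a, t, rfl⟩
    have hcountLS : ∀ z, L.count z = S.count z := fun z => hperm.count_eq z
    have hBspec := bestRun_spec L.length L (le_refl _) hLp x 0
    rcases hBspec with ⟨_, hall⟩ | ⟨v, hv, he, _, hall⟩
    · exfalso
      have hxL : x ∈ L := hL ▸ List.mem_cons_self
      exact absurd (hall x hxL) (by omega)
    · -- conclude: both are values of maximal multiplicity, Pre_ makes them equal
      have hvS : v ∈ S := hperm.mem_iff.1 hv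
      have hmodeB : ∀ z ∈ S, S.count z ≤ S.count v := by
        intro z hz
        rw [← hcountLS z, ← hcountLS v]
        exact hall z (hperm.mem_iff.2 hz)
      rw [hL] at he
      rw [hmA, hL]
      simpa [he, if_neg hS] using pre_unique tp rp fr hpre mA hmAS v hvS hmodeA hmodeB
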